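-- pv_equiv track=rewrite | github.com/LoicCK/ElectivePython | listes/listes_algo.py | est_trie
-- ===== SOURCE A (Python) =====
-- from typing import List, Tuple
--
-- def est_trie(l: List[int]) -> int:
--     """
--     Permet de savoir si une liste d'entiers est croissante, décroissante ou ni l'un ni l'autre
--
--     :param l: La liste d'entiers
--     :type l: list[int]
--     :return: 1 si la liste est croissante ou constante, -1 si elle est décroissante et 0 sinon.
--     :rtype: int
--
--     >>> L = [33, 36, 27, 15, 43, 35, 36, 42, 49, 21]
--     >>> est_trie(L)
--     0
--     >>> L = [15, 21, 27, 33, 35, 36, 36, 42, 43, 49]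
--     >>> est_trie(L)
--     1
--     >>> L = [49, 43, 42, 36, 36, 35, 33, 27, 21, 15]
--     >>> est_trie(L)
--     -1
--     """
--     longueur_l = len(l)
--     if longueur_l < 2:
--         return 0
--
--     # On cherche à savoir si la suite peut être croissante et / ou décroissante
--     peut_etre_croissant = True
--     peut_etre_decroissant = True
--
--     for i in range(0,longueur_l-1):
--         if l[i] > l[i+1]:
--             peut_etre_croissant = False
--         elif l[i] < l[i+1]:
--             peut_etre_decroissant = False
--
--     if peut_etre_croissant:
--         return 1
--     if peut_etre_decroissant:
--         return -1
--     return 0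
-- ===== SOURCE B (Python) =====
-- def est_trie(l):
--     # B: compare l with its sorted copies instead of scanning adjacent pairs with flags.
--     if len(l) < 2:
--         return 0
--     if l == sorted(l):
--         return 1
--     if l == sorted(l, reverse=True):
--         return -1
--     return 0
-- ===== Notes on version B (the rewrite author's own statement) =====
-- stated objective: simpler
-- what changed: Replaces the manual index loop maintaining two monotonicity flags by comparing the list with sorted(l) and sorted(l, reverse=True).
import Mathlib
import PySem

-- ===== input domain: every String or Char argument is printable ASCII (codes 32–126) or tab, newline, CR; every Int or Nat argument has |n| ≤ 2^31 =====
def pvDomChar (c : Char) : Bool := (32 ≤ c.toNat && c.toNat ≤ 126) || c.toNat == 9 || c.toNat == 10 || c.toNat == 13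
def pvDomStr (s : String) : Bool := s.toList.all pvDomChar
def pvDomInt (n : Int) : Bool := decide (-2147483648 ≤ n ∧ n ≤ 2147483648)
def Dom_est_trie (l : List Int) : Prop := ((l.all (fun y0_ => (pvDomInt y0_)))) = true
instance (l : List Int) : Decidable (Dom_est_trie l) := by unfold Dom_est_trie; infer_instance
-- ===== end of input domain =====

-- B replaces A's two-flag adjacent-pair index loop by comparing the list with its ascending
-- and descending sorted copies (objective: simpler); proved equal on all inputs.


-- ===== PORT A =====
def est_trie (l : List Int) : Int :=
  let longueur_l : Int := PySem.List.len l
  if longueur_l < 2 then 0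
  else
    let flags := (PySem.List.pyRange 0 (longueur_l - 1)).foldl
      (fun (st : Bool × Bool) i =>
        if PySem.List.pyGetD l i 0 > PySem.List.pyGetD l (i + 1) 0 then (false, st.2)
        else if PySem.List.pyGetD l i 0 < PySem.List.pyGetD l (i + 1) 0 then (st.1, false)
        else st)
      (true, true)
    if flags.1 then 1 else if flags.2 then -1 else 0

-- ===== PORT B =====
def est_trie_alt (l : List Int) : Int :=
  if PySem.List.len l < 2 then 0
  else if l = PySem.List.sorted l (fun x => x) then 1
  else if l = PySem.List.sorted l (fun x => x) true then -1
  else 0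

-- ===== PRECONDITION & SPEC =====
def Spec_est_trie (l : List Int) (out : Int) : Prop := out = est_trie_alt l
instance (l : List Int) (out : Int) : Decidable (Spec_est_trie l out) := by unfold Spec_est_trie; infer_instance

-- ===== CLAIM (what is proved, stated in full; the proofs are below) =====
def Claim_equal_est_trie : Prop := ∀ (l : List Int), Dom_est_trie l → Spec_est_trie l (est_trie l)

-- ===== LEMMAS AND PROOFS =====

-- A's loop body viewed as a function of the adjacent pair it compares.
def pvStep (st : Bool × Bool) (p : Int × Int) : Bool × Bool :=
  if p.1 > p.2 then (false, st.2) else if p.1 < p.2 then (st.1, false) else st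

theorem pvStep_foldl (ps : List (Int × Int)) (c d : Bool) :
    ps.foldl pvStep (c, d)
      = (c && ps.all (fun p => decide (p.1 ≤ p.2)), d && ps.all (fun p => decide (p.2 ≤ p.1))) := by
  induction ps generalizing c d with
  | nil => simp
  | cons p t ih =>
    simp only [List.foldl_cons, List.all_cons, pvStep]
    split_ifs with h1 h2
    · rw [ih]
      have : decide (p.1 ≤ p.2) = false := by simp; omega
      simp [this, show decide (p.2 ≤ p.1) = true by simp; omega, Bool.and_assoc]
    · rw [ih]
      have : decide (p.2 ≤ p.1) = false := by simp; omega
      simp [this, show decide (p.1 ≤ p.2) = true by simp; omega, Bool.and_assoc]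
    · rw [ih]
      simp [show decide (p.1 ≤ p.2) = true by simp; omega,
            show decide (p.2 ≤ p.1) = true by simp; omega]

theorem pvFold_range_zip (l : List Int) (hne : l ≠ []) (st : Bool × Bool) :
    (PySem.List.pyRange 0 ((PySem.List.len l) - 1)).foldl
      (fun st i => pvStep st (PySem.List.pyGetD l i 0, PySem.List.pyGetD l (i + 1) 0)) st
    = (l.zip l.tail).foldl pvStep st := by
  have hlen : PySem.List.len l - 1 = PySem.List.len (l.zip l.tail) := by
    cases l with
    | nil => exact absurd rfl hne
    | cons x t =>
      simp only [PySem.List.len, List.length_zip, List.length_tail]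
      simp
  rw [hlen]
  rw [← PySem.List.foldl_pyRange_zero_pyGetD (l.zip l.tail) (0, 0) pvStep st]
  apply PySem.List.foldl_congr_mem
  intro acc i hi
  have hi' := (PySem.List.mem_pyRange_one (x := i)).1 hi
  have h0 : 0 ≤ i := hi'.1
  lift i to ℕ using h0 with n
  have hn : n < (l.zip l.tail).length := by
    have h2 := hi'.2
    simp only [PySem.List.len] at h2
    exact_mod_cast h2
  have hnt : n < l.tail.length := by
    rw [List.length_zip] at hn; omega
  have hnl : n < l.length := by
    rw [List.length_tail] at hnt; omega
  have hnl1 : n + 1 < l.length := by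
    rw [List.length_tail] at hnt
    cases l with
    | nil => simp at hnt
    | cons x t => simp at hnt ⊢; omega
  have e1 : PySem.List.pyGetD (l.zip l.tail) ((n : Int)) (0, 0) = (l.zip l.tail)[n] := by
    rw [PySem.List.pyGetD_natCast]
    exact List.getD_eq_getElem _ _ hn
  have e2 : PySem.List.pyGetD l ((n : Int)) 0 = l[n] := by
    rw [PySem.List.pyGetD_natCast]
    exact List.getD_eq_getElem _ _ hnl
  have e3 : PySem.List.pyGetD l ((n : Int) + 1) 0 = l[n + 1] := by
    rw [show ((n : Int) + 1 : Int) = ((n + 1 : Nat) : Int) by push_cast; ring,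
        PySem.List.pyGetD_natCast]
    exact List.getD_eq_getElem _ _ hnl1
  rw [e1, e2, e3, List.getElem_zip, List.getElem_tail]

theorem pvZip_isChain_le (l : List Int) :
    ((l.zip l.tail).all (fun p => decide (p.1 ≤ p.2)) = true) ↔ List.IsChain (fun a b => a ≤ b) l := by
  induction l with
  | nil => simp
  | cons x t ih =>
    cases t with
    | nil => simp
    | cons y u =>
      simp only [List.tail_cons, List.zip_cons_cons, List.all_cons, Bool.and_eq_true,
        decide_eq_true_eq, List.isChain_cons_cons]
      rw [← ih]
      simp

theorem pvZip_isChain_ge (l : List Int) :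
    ((l.zip l.tail).all (fun p => decide (p.2 ≤ p.1)) = true) ↔ List.IsChain (fun a b => b ≤ a) l := by
  induction l with
  | nil => simp
  | cons x t ih =>
    cases t with
    | nil => simp
    | cons y u =>
      simp only [List.tail_cons, List.zip_cons_cons, List.all_cons, Bool.and_eq_true,
        decide_eq_true_eq, List.isChain_cons_cons]
      rw [← ih]
      simp

theorem pvZip_all_le (l : List Int) :
    ((l.zip l.tail).all (fun p => decide (p.1 ≤ p.2)) = true) ↔ l.Pairwise (· ≤ ·) := by
  rw [pvZip_isChain_le]
  exact @List.isChain_iff_pairwise Int (fun a b => a ≤ b) l ⟨fun h1 h2 => le_trans h1 h2⟩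

theorem pvZip_all_ge (l : List Int) :
    ((l.zip l.tail).all (fun p => decide (p.2 ≤ p.1)) = true) ↔ l.Pairwise (fun a b => b ≤ a) := by
  rw [pvZip_isChain_ge]
  exact @List.isChain_iff_pairwise Int (fun a b => b ≤ a) l ⟨fun h1 h2 => le_trans h2 h1⟩

theorem pvSorted_asc (l : List Int) :
    l = PySem.List.sorted l (fun x => x) ↔ l.Pairwise (· ≤ ·) := by
  constructor
  · intro h
    have := PySem.List.sorted_pairwise l (fun x => x)
    rw [← h] at this
    exact this
  · intro h
    exact (PySem.List.sorted_eq_self_of_pairwise l (fun x => x) h).symm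

theorem pvSorted_desc (l : List Int) :
    l = PySem.List.sorted l (fun x => x) true ↔ l.Pairwise (fun a b => b ≤ a) := by
  constructor
  · intro h
    have := PySem.List.sorted_pairwise_rev l (fun x => x)
    rw [← h] at this
    exact this
  · intro h
    exact (PySem.List.sorted_rev_eq_self_of_pairwise l (fun x => x) h).symm

-- ===== VERDICT (by name: the statement is the Claim_ definition above) =====
theorem est_trie_spec : Claim_equal_est_trie := by
  intro l _
  unfold Spec_est_trie est_trie est_trie_alt
  by_cases hlt : PySem.List.len l < 2
  · have h1 : l.length ≤ 1 := by simp [PySem.List.len] at hlt; omega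
    simp [h1]
  · have hne : l ≠ [] := by
      intro h; subst h; simp [PySem.List.len] at hlt
    simp only [hlt, if_false]
    rw [show (fun (st : Bool × Bool) i =>
          if PySem.List.pyGetD l i 0 > PySem.List.pyGetD l (i + 1) 0 then (false, st.2)
          else if PySem.List.pyGetD l i 0 < PySem.List.pyGetD l (i + 1) 0 then (st.1, false)
          else st)
        = (fun st i => pvStep st (PySem.List.pyGetD l i 0, PySem.List.pyGetD l (i + 1) 0)) from rfl]
    rw [pvFold_range_zip l hne, pvStep_foldl]
    by_cases hasc : l.Pairwise (· ≤ ·)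
    · have h1 : (l.zip l.tail).all (fun p => decide (p.1 ≤ p.2)) = true := (pvZip_all_le l).2 hasc
      have h2 : l = PySem.List.sorted l (fun x => x) := (pvSorted_asc l).2 hasc
      simp [h1, ← h2]
    · have h1 : (l.zip l.tail).all (fun p => decide (p.1 ≤ p.2)) = false := by
        rcases Bool.eq_false_or_eq_true ((l.zip l.tail).all (fun p => decide (p.1 ≤ p.2))) with h | h
        · exact absurd ((pvZip_all_le l).1 h) hasc
        · exact h
      have h2 : ¬ (l = PySem.List.sorted l (fun x => x)) := fun h => hasc ((pvSorted_asc l).1 h)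
      by_cases hdesc : l.Pairwise (fun a b => b ≤ a)
      · have h3 : (l.zip l.tail).all (fun p => decide (p.2 ≤ p.1)) = true :=
          (pvZip_all_ge l).2 hdesc
        have h4 : l = PySem.List.sorted l (fun x => x) true := (pvSorted_desc l).2 hdesc
        simp [h1, h3, h2, ← h4]
      · have h3 : (l.zip l.tail).all (fun p => decide (p.2 ≤ p.1)) = false := by
          rcases Bool.eq_false_or_eq_true ((l.zip l.tail).all (fun p => decide (p.2 ≤ p.1))) with h | h
          · exact absurd ((pvZip_all_ge l).1 h) hdesc
          · exact h
        have h4 : ¬ (l = PySem.List.sorted l (fun x => x) true) :=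
          fun h => hdesc ((pvSorted_desc l).1 h)
        simp [h1, h3, h2, h4]
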